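-- pv_equiv track=rewrite | github.com/KwanFam26022005/tdtu-student-handbook-chatbot | phase2_process.py | _merge_table_paragraphs
-- ===== SOURCE A (Python) =====
-- def _merge_table_paragraphs(paragraphs: list[str]) -> list[str]:
--     """
--     Merge contiguous Markdown table lines into a single paragraph block.
--     This prevents table rows from being split across different chunks.
--     """
--     merged = []
--     table_buffer = []
--
--     for para in paragraphs:
--         lines = para.strip().split('\n')
--         is_table = any(line.strip().startswith('|') for line in lines)
--
--         if is_table:
--             table_buffer.append(para)
--         else:
--             if table_buffer:
--                 # Flush table block as single paragraph
--                 merged.append('\n'.join(table_buffer))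
--                 table_buffer = []
--             merged.append(para)
--
--     if table_buffer:
--         merged.append('\n'.join(table_buffer))
--
--     return merged
-- ===== SOURCE B (Python) =====
-- def _is_table(para: str) -> bool:
--     return any(line.strip().startswith('|') for line in para.strip().split('\n'))
--
--
-- def _merge_table_paragraphs(paragraphs: list[str]) -> list[str]:
--     """Staged, index-based formulation: first compute the table flag of every
--     paragraph, then the cut positions where the flag flips, then emit each
--     [a:b) slice at once (joined if it is a table run, spliced in otherwise)."""
--     if not paragraphs:
--         return []
--     flags = [_is_table(p) for p in paragraphs]
--     cuts = [0] + [i for i, (x, y) in enumerate(zip(flags, flags[1:]), 1) if x != y] \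
--                + [len(paragraphs)]
--     merged = []
--     for a, b in zip(cuts, cuts[1:]):
--         if flags[a]:
--             merged.append('\n'.join(paragraphs[a:b]))
--         else:
--             merged.extend(paragraphs[a:b])
--     return merged
-- ===== Notes on version B (the rewrite author's own statement) =====
-- stated objective: alternative
-- what changed: Replaced A's streaming buffer-and-flush loop with a staged, index-based computation: one pass builds the per-paragraph table flags, a second derives the cut positions where the flag flips, and the output is assembled from the [a:b) slices between consecutive cuts (joined for table runs, spliced in otherwise) - no mutable buffer and no trailing flush.
import Mathlib
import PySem

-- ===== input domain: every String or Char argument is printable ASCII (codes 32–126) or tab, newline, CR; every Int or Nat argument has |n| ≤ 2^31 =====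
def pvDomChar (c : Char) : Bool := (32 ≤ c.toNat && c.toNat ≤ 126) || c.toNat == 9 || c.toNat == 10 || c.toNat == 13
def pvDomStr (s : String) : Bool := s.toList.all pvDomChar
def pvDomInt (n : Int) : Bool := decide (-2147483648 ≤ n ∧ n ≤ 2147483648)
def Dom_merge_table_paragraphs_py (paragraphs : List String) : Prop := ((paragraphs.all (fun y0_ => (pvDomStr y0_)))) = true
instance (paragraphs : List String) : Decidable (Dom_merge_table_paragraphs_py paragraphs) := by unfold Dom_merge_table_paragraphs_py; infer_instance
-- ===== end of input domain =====

set_option maxHeartbeats 1000000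


-- B replaces A's streaming buffer-and-flush loop by a staged, index-based computation
-- (per-paragraph flags, then the cut positions where the flag flips, then one slice per run).

-- ===== PORT A =====
-- shared predicate: any(line.strip().startswith('|') for line in para.strip().split('\n'))
def pvIsTablePara (para : String) : Bool :=
  ((PySem.Str.split? (PySem.Str.strip para) "\n").getD []).any  -- sep "\n" ≠ "", so split? is some
    (fun line => PySem.Str.startswith (PySem.Str.strip line) "|")

-- one loop iteration of A: state = (merged, table_buffer)
def mtpStep (st : List String × List String) (para : String) : List String × List String :=
  if pvIsTablePara para then (st.1, st.2 ++ [para])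
  else if st.2.isEmpty then (st.1 ++ [para], st.2)
  else (st.1 ++ [PySem.Str.join "\n" st.2, para], [])

def merge_table_paragraphs_py (paragraphs : List String) : List String :=
  let st := paragraphs.foldl mtpStep ([], [])
  if st.2.isEmpty then st.1 else st.1 ++ [PySem.Str.join "\n" st.2]

-- ===== PORT B =====
-- flags = [_is_table(p) for p in paragraphs]
-- cuts = [0] + [i for i, (x, y) in enumerate(zip(flags, flags[1:]), 1) if x != y] + [len(paragraphs)]
-- for a, b in zip(cuts, cuts[1:]): append join(paragraphs[a:b]) if flags[a] else extend paragraphs[a:b]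
def merge_table_paragraphs_py_alt (paragraphs : List String) : List String :=
  if paragraphs.isEmpty then [] else
  let flags := paragraphs.map pvIsTablePara
  let cuts : List Int :=
    0 :: (((PySem.List.enumerate (flags.zip (PySem.List.slice flags (some 1) none)) 1).filterMap
        (fun p => if p.2.1 != p.2.2 then some p.1 else none))
      ++ [(paragraphs.length : Int)])
  (cuts.zip (PySem.List.slice cuts (some 1) none)).foldl
    (fun merged ab =>
      if PySem.List.pyGetD flags ab.1 false then
        merged ++ [PySem.Str.join "\n" (PySem.List.slice paragraphs (some ab.1) (some ab.2))]
      else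
        merged ++ PySem.List.slice paragraphs (some ab.1) (some ab.2))
    []

-- ===== PRECONDITION & SPEC =====
def Spec_merge_table_paragraphs_py (paragraphs : List String) (out : List String) : Prop := out = merge_table_paragraphs_py_alt paragraphs
instance (paragraphs : List String) (out : List String) : Decidable (Spec_merge_table_paragraphs_py paragraphs out) := by unfold Spec_merge_table_paragraphs_py; infer_instance

-- ===== CLAIM (what is proved, stated in full; the proofs are below) =====
def Claim_equal_merge_table_paragraphs_py : Prop := ∀ (paragraphs : List String), Dom_merge_table_paragraphs_py paragraphs → Spec_merge_table_paragraphs_py paragraphs (merge_table_paragraphs_py paragraphs)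

-- ===== LEMMAS AND PROOFS =====

-- the common reference recursion: maximal table runs joined, other paragraphs kept
def pvR : List String → List String
  | [] => []
  | p :: rest =>
    if pvIsTablePara p then
      PySem.Str.join "\n" (p :: rest.takeWhile pvIsTablePara)
        :: pvR (rest.dropWhile pvIsTablePara)
    else
      p :: pvR rest
termination_by l => l.length
decreasing_by
  · exact Nat.lt_succ_of_le (List.length_dropWhile_le _ _)
  · simp

-- ---- A = pvR ----

-- the remainder of A's run, as a function of the current buffer
def mtpAux (b : List String) : List String → List String
  | [] => if b.isEmpty then [] else [PySem.Str.join "\n" b]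
  | p :: ps =>
    if pvIsTablePara p then mtpAux (b ++ [p]) ps
    else if b.isEmpty then p :: mtpAux [] ps
    else PySem.Str.join "\n" b :: p :: mtpAux [] ps

theorem mtpAux_spec (ps : List String) : ∀ b : List String,
    mtpAux b ps = (if b.isEmpty then pvR ps
      else PySem.Str.join "\n" (b ++ ps.takeWhile pvIsTablePara)
        :: pvR (ps.dropWhile pvIsTablePara)) := by
  induction ps with
  | nil => intro b; cases b <;> simp [mtpAux, pvR]
  | cons p ps ih =>
    intro b
    by_cases hp : pvIsTablePara p
    · cases b <;> simp [mtpAux, hp, ih, pvR]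
    · cases b <;> simp [mtpAux, hp, ih, pvR]

theorem mtp_foldl (ps : List String) : ∀ (m b : List String),
    (let st := ps.foldl mtpStep (m, b)
     if st.2.isEmpty then st.1 else st.1 ++ [PySem.Str.join "\n" st.2]) = m ++ mtpAux b ps := by
  induction ps with
  | nil => intro m b; cases b <;> simp [mtpAux]
  | cons p ps ih =>
    intro m b
    by_cases hp : pvIsTablePara p
    · simpa [mtpStep, hp, mtpAux] using ih m (b ++ [p])
    · cases b with
      | nil => simpa [mtpStep, hp, mtpAux] using ih (m ++ [p]) []
      | cons x xs =>
        have := ih (m ++ [PySem.Str.join "\n" (x :: xs), p]) []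
        simpa [mtpStep, hp, mtpAux] using this

theorem A_eq_pvR (l : List String) : merge_table_paragraphs_py l = pvR l := by
  unfold merge_table_paragraphs_py
  rw [mtp_foldl l [] []]
  simp [mtpAux_spec]

-- ---- B = pvR ----

-- indices (counting from s) at which two adjacent flags differ
def chgN : List Bool → Nat → List Nat
  | [], _ => []
  | [_], _ => []
  | x :: y :: t, s => (if x != y then [s] else []) ++ chgN (y :: t) (s + 1)

theorem chgN_uniform : ∀ (k : Nat) (s : Nat) (c : Bool), chgN (List.replicate k c) s = []
  | 0, _, _ => by simp [chgN]
  | 1, _, _ => by simp [chgN]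
  | (k+2), s, c => by
    rw [show List.replicate (k+2) c = c :: c :: List.replicate k c from rfl]
    rw [show chgN (c :: c :: List.replicate k c) s
        = (if c != c then [s] else []) ++ chgN (c :: List.replicate k c) (s+1) from rfl]
    rw [show c :: List.replicate k c = List.replicate (k+1) c from rfl]
    simp [chgN_uniform (k+1) (s+1) c]

theorem chgN_run : ∀ (k : Nat) (c d : Bool) (t : List Bool) (s : Nat), (d == c) = false →
    chgN (List.replicate (k+1) c ++ d :: t) s = (s + k) :: chgN (d :: t) (s + k + 1)
  | 0, c, d, t, s, h => by
    have hcd : (c != d) = true := by cases c <;> cases d <;> simp_all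
    simp [chgN, hcd]
  | (k+1), c, d, t, s, h => by
    rw [show List.replicate (k+2) c ++ d :: t = c :: c :: (List.replicate k c ++ d :: t) from rfl]
    rw [show chgN (c :: c :: (List.replicate k c ++ d :: t)) s
        = (if c != c then [s] else []) ++ chgN (c :: (List.replicate k c ++ d :: t)) (s+1) from rfl]
    rw [show c :: (List.replicate k c ++ d :: t) = List.replicate (k+1) c ++ d :: t from rfl]
    rw [chgN_run k c d t (s+1) h]
    have h1 : s + 1 + k = s + (k+1) := by omega
    have h2 : s + 1 + k + 1 = s + (k+1) + 1 := by omega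
    simp [h1, h2]

theorem chgN_add : ∀ (x : List Bool) (s m : Nat), chgN x (s + m) = (chgN x s).map (· + m)
  | [], _, _ => by simp [chgN]
  | [_], _, _ => by simp [chgN]
  | x :: y :: t, s, m => by
    simp only [chgN, List.map_append]
    rw [show s + m + 1 = (s + 1) + m by omega, chgN_add (y :: t) (s+1) m]
    by_cases h : (x != y) = true <;> simp [h]

-- Nat-level cut positions and run emission for B
def pvCuts (l : List String) : List Nat :=
  0 :: (chgN (l.map pvIsTablePara) 1 ++ [l.length])

def pvEmit (l : List String) (ab : Nat × Nat) : List String :=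
  if (l.map pvIsTablePara).getD ab.1 false then
    [PySem.Str.join "\n" ((l.drop ab.1).take (ab.2 - ab.1))]
  else (l.drop ab.1).take (ab.2 - ab.1)

def pvBody (l : List String) : List String :=
  ((pvCuts l).zip (pvCuts l).tail).flatMap (pvEmit l)

-- the enumerate/zip/filterMap comprehension of Source B computes chgN (cast to Int)
theorem filterMap_enum_eq_chgN : ∀ (x : List Bool) (s : Nat),
    (PySem.List.enumerate (x.zip x.tail) (s : Int)).filterMap
        (fun p => if p.2.1 != p.2.2 then some p.1 else none)
      = (chgN x s).map (Nat.cast : Nat → Int)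
  | [], _ => by simp [chgN]
  | [_], _ => by simp [chgN]
  | x :: y :: t, s => by
    have hrec := filterMap_enum_eq_chgN (y :: t) (s + 1)
    push_cast at hrec
    simp only [List.tail_cons, List.zip_cons_cons, PySem.List.enumerate_cons, List.filterMap_cons,
      chgN]
    rw [show ((y :: t).zip t) = ((y :: t).zip (y :: t).tail) from rfl, hrec]
    by_cases h : (x != y) = true <;> simp [h]

-- port B equals its Nat-level body
theorem B_eq_body (l : List String) : merge_table_paragraphs_py_alt l = pvBody l := by
  cases l with
  | nil => simp [merge_table_paragraphs_py_alt, pvBody, pvCuts, pvEmit, chgN]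
  | cons p t =>
    unfold merge_table_paragraphs_py_alt
    simp only [List.isEmpty_cons, if_neg Bool.false_ne_true, PySem.List.slice_from_one]
    rw [show (1 : Int) = ((1 : Nat) : Int) from rfl,
      filterMap_enum_eq_chgN ((p :: t).map pvIsTablePara) 1]
    have hcast : (0 : Int) :: ((chgN ((p :: t).map pvIsTablePara) 1).map (Nat.cast : Nat → Int)
          ++ [((p :: t).length : Int)])
        = (pvCuts (p :: t)).map (Nat.cast : Nat → Int) := by
      simp [pvCuts]
    rw [hcast]
    rw [← List.map_tail, List.zip_map]
    have hfun : (fun (merged : List String) (ab : Int × Int) =>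
          if PySem.List.pyGetD ((p :: t).map pvIsTablePara) ab.1 false then
            merged ++ [PySem.Str.join "\n" (PySem.List.slice (p :: t) (some ab.1) (some ab.2))]
          else merged ++ PySem.List.slice (p :: t) (some ab.1) (some ab.2))
        = (fun merged ab =>
          merged ++ (if PySem.List.pyGetD ((p :: t).map pvIsTablePara) ab.1 false then
            [PySem.Str.join "\n" (PySem.List.slice (p :: t) (some ab.1) (some ab.2))]
          else PySem.List.slice (p :: t) (some ab.1) (some ab.2))) := by
      funext m ab; split_ifs <;> rfl
    rw [hfun, PySem.List.foldl_append_eq_flatMap, List.flatMap_map, List.nil_append]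
    unfold pvBody
    apply List.flatMap_congr
    intro ab _
    rcases ab with ⟨a, b⟩
    simp [pvEmit, Prod.map, PySem.List.slice_natCast, PySem.List.pyGetD_natCast]

-- pvR passes an all-false prefix through unchanged
theorem pvR_false_prefix : ∀ (u v : List String),
    (∀ x ∈ u, pvIsTablePara x = false) → pvR (u ++ v) = u ++ pvR v
  | [], v, _ => by simp
  | x :: u, v, h => by
    have hx : pvIsTablePara x = false := h x (by simp)
    simp only [List.cons_append, pvR, hx, if_neg Bool.false_ne_true]
    rw [pvR_false_prefix u v (fun y hy => h y (by simp [hy]))]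

-- takeWhile / dropWhile over a satisfying prefix
theorem takeWhile_app (p : String → Bool) : ∀ (u v : List String),
    (∀ x ∈ u, p x = true) → (u ++ v).takeWhile p = u ++ v.takeWhile p
  | [], v, _ => by simp
  | x :: u, v, h => by
    have hx : p x = true := h x (by simp)
    simp only [List.cons_append, List.takeWhile_cons, hx]
    rw [takeWhile_app p u v (fun y hy => h y (by simp [hy]))]
    simp

theorem dropWhile_app (p : String → Bool) : ∀ (u v : List String),
    (∀ x ∈ u, p x = true) → (u ++ v).dropWhile p = v.dropWhile p
  | [], v, _ => by simp
  | x :: u, v, h => by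
    have hx : p x = true := h x (by simp)
    simp only [List.cons_append, List.dropWhile_cons, hx]
    rw [dropWhile_app p u v (fun y hy => h y (by simp [hy]))]
    simp

-- the inductive step of body = pvR, over one maximal run p :: u followed by v
theorem body_step (p : String) (u v : List String)
    (hu : ∀ x ∈ u, pvIsTablePara x = pvIsTablePara p)
    (hv : ∀ (d : String) (t' : List String), v = d :: t' → (pvIsTablePara d == pvIsTablePara p) = false)
    (ihv : pvBody v = pvR v) :
    pvBody (p :: (u ++ v)) = pvR (p :: (u ++ v)) := by
  have hmapu : u.map pvIsTablePara = List.replicate u.length (pvIsTablePara p) := by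
    rw [List.eq_replicate_iff]
    refine ⟨by simp, ?_⟩
    intro b hb
    obtain ⟨x, hx, rfl⟩ := List.mem_map.mp hb
    exact hu x hx
  have hmapl : (p :: (u ++ v)).map pvIsTablePara
      = List.replicate (u.length + 1) (pvIsTablePara p) ++ v.map pvIsTablePara := by
    simp [List.map_append, hmapu, List.replicate_succ]
  cases v with
  | nil =>
    simp only [List.append_nil] at hmapl ⊢
    have huall : ∀ x ∈ p :: u, pvIsTablePara x = pvIsTablePara p := by
      intro x hx
      rcases List.mem_cons.mp hx with rfl | hx'
      · rfl
      · exact hu x hx'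
    have hcuts : pvCuts (p :: u) = [0, u.length + 1] := by
      unfold pvCuts
      rw [hmapl]
      simp [chgN_uniform]
    have hemit : pvEmit (p :: u) (0, u.length + 1)
        = if pvIsTablePara p then [PySem.Str.join "\n" (p :: u)] else p :: u := by
      unfold pvEmit
      have h1 : ((p :: u).map pvIsTablePara).getD 0 false = pvIsTablePara p := by
        simp
      have h2 : ((p :: u).drop 0).take (u.length + 1 - 0) = p :: u := by
        simp only [List.drop_zero, Nat.sub_zero]
        rw [show u.length + 1 = (p :: u).length by simp]
        exact List.take_length
      rw [h1, h2]
    have hbody : pvBody (p :: u) = if pvIsTablePara p then [PySem.Str.join "\n" (p :: u)] else p :: u := by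
      unfold pvBody
      rw [hcuts]
      simp only [List.zip_cons_cons, List.tail_cons, List.zip_nil_right, List.zip_nil_left]
      simp [hemit]
    rw [hbody]
    cases hc : pvIsTablePara p with
    | false =>
      have := pvR_false_prefix (p :: u) [] (by intro x hx; rw [huall x hx]; exact hc)
      simp only [List.append_nil] at this
      rw [this]
      simp [pvR]
    | true =>
      have htw : u.takeWhile pvIsTablePara = u := by
        rw [show u = u ++ [] from (List.append_nil u).symm, takeWhile_app]
        · simp
        · intro x hx; rw [hu x (by simpa using hx)]; exact hc
      have hdw : u.dropWhile pvIsTablePara = [] := by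
        rw [show u = u ++ [] from (List.append_nil u).symm, dropWhile_app]
        · simp
        · intro x hx; rw [hu x (by simpa using hx)]; exact hc
      simp [pvR, hc, htw, hdw]
  | cons d t' =>
    have hd : (pvIsTablePara d == pvIsTablePara p) = false := hv d t' rfl
    have hchg : chgN ((p :: (u ++ d :: t')).map pvIsTablePara) 1
        = (u.length + 1) :: ((chgN ((d :: t').map pvIsTablePara) 1).map (· + (u.length + 1))) := by
      rw [hmapl]
      rw [show (d :: t').map pvIsTablePara = pvIsTablePara d :: t'.map pvIsTablePara from rfl]
      rw [chgN_run u.length (pvIsTablePara p) (pvIsTablePara d) (t'.map pvIsTablePara) 1 hd]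
      rw [show 1 + u.length = u.length + 1 by omega]
      rw [show u.length + 1 + 1 = 1 + (u.length + 1) by omega]
      rw [chgN_add]
    have hcuts : pvCuts (p :: (u ++ d :: t'))
        = 0 :: (pvCuts (d :: t')).map (· + (u.length + 1)) := by
      unfold pvCuts
      rw [hchg, show (p :: (u ++ d :: t')).length = (d :: t').length + (u.length + 1) from by
        simp; omega]
      simp
    have hzip : (pvCuts (p :: (u ++ d :: t'))).zip (pvCuts (p :: (u ++ d :: t'))).tail
        = (0, u.length + 1)
          :: ((pvCuts (d :: t')).zip (pvCuts (d :: t')).tail).map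
              (Prod.map (· + (u.length + 1)) (· + (u.length + 1))) := by
      rw [hcuts]
      have hBv : (pvCuts (d :: t')).map (· + (u.length + 1))
          = (u.length + 1) :: ((chgN ((d :: t').map pvIsTablePara) 1 ++ [(d :: t').length]).map
              (· + (u.length + 1))) := by
        simp [pvCuts]
      rw [hBv]
      simp only [List.tail_cons, List.zip_cons_cons]
      rw [← hBv]
      rw [show ((chgN ((d :: t').map pvIsTablePara) 1 ++ [(d :: t').length]).map (· + (u.length + 1)))
          = ((pvCuts (d :: t')).map (· + (u.length + 1))).tail from by simp [pvCuts]]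
      rw [← List.map_tail, List.zip_map]
    have hshift : ∀ ab : Nat × Nat,
        pvEmit (p :: (u ++ d :: t')) (Prod.map (· + (u.length + 1)) (· + (u.length + 1)) ab)
          = pvEmit (d :: t') ab := by
      rintro ⟨a, b⟩
      unfold pvEmit
      simp only [Prod.map, Prod.fst, Prod.snd]
      have hflag : ((p :: (u ++ d :: t')).map pvIsTablePara).getD (a + (u.length + 1)) false
          = ((d :: t').map pvIsTablePara).getD a false := by
        rw [hmapl, List.getD_eq_getElem?_getD, List.getD_eq_getElem?_getD,
          List.getElem?_append_right (by simp)]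
        simp
      have hdrop : (p :: (u ++ d :: t')).drop (a + (u.length + 1)) = (d :: t').drop a := by
        rw [show p :: (u ++ d :: t') = (p :: u) ++ d :: t' from rfl]
        rw [show a + (u.length + 1) = (p :: u).length + a from by simp; omega]
        exact List.drop_length_add_append a
      have htake : b + (u.length + 1) - (a + (u.length + 1)) = b - a := by omega
      rw [hflag, hdrop, htake]
    have hemit : pvEmit (p :: (u ++ d :: t')) (0, u.length + 1)
        = if pvIsTablePara p then [PySem.Str.join "\n" (p :: u)] else p :: u := by
      unfold pvEmit
      have h1 : ((p :: (u ++ d :: t')).map pvIsTablePara).getD 0 false = pvIsTablePara p := by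
        simp
      have h2 : ((p :: (u ++ d :: t')).drop 0).take (u.length + 1 - 0) = p :: u := by
        simp only [List.drop_zero, Nat.sub_zero]
        rw [show p :: (u ++ d :: t') = (p :: u) ++ d :: t' from rfl]
        rw [show u.length + 1 = (p :: u).length from by simp]
        exact List.take_left
      rw [h1, h2]
    have hbody : pvBody (p :: (u ++ d :: t'))
        = (if pvIsTablePara p then [PySem.Str.join "\n" (p :: u)] else p :: u) ++ pvR (d :: t') := by
      have ihv' : ((pvCuts (d :: t')).zip (pvCuts (d :: t')).tail).flatMap (pvEmit (d :: t'))
          = pvR (d :: t') := by unfold pvBody at ihv; exact ihv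
      unfold pvBody
      rw [hzip, List.flatMap_cons, List.flatMap_map, hemit]
      rw [show (fun ab => pvEmit (p :: (u ++ d :: t'))
            (Prod.map (· + (u.length + 1)) (· + (u.length + 1)) ab)) = pvEmit (d :: t') from
        funext hshift]
      rw [ihv']
    rw [hbody]
    cases hc : pvIsTablePara p with
    | false =>
      have hpref := pvR_false_prefix u (d :: t') (by intro x hx; rw [hu x hx]; exact hc)
      simp [pvR, hc, hpref]
    | true =>
      have hfd' : pvIsTablePara d = false := by
        cases hdd : pvIsTablePara d
        · rfl
        · rw [hdd, hc] at hd; simp at hd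
      have htw : (u ++ d :: t').takeWhile pvIsTablePara = u := by
        rw [takeWhile_app pvIsTablePara u (d :: t')
          (by intro x hx; rw [hu x hx]; exact hc)]
        simp [List.takeWhile_cons, hfd']
      have hdw : (u ++ d :: t').dropWhile pvIsTablePara = d :: t' := by
        rw [dropWhile_app pvIsTablePara u (d :: t')
          (by intro x hx; rw [hu x hx]; exact hc)]
        simp [List.dropWhile_cons, hfd']
      simp [pvR, hc, htw, hdw]

-- body = pvR on every list
theorem body_eq_pvR : ∀ (N : Nat) (l : List String), l.length ≤ N → pvBody l = pvR l := by
  intro N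
  induction N with
  | zero =>
    intro l hl
    have : l = [] := List.length_eq_zero_iff.mp (Nat.le_zero.mp hl)
    subst this
    simp [pvBody, pvCuts, pvEmit, chgN, pvR]
  | succ N ih =>
    intro l hl
    cases l with
    | nil => simp [pvBody, pvCuts, pvEmit, chgN, pvR]
    | cons p t =>
      have hsplit := List.takeWhile_append_dropWhile
        (p := fun x => pvIsTablePara x == pvIsTablePara p) (l := t)
      have h1 : ∀ x ∈ t.takeWhile (fun x => pvIsTablePara x == pvIsTablePara p),
          pvIsTablePara x = pvIsTablePara p := by
        intro x hx
        have hb := List.mem_takeWhile_imp hx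
        simpa using hb
      have h2 : ∀ (d : String) (t' : List String),
          t.dropWhile (fun x => pvIsTablePara x == pvIsTablePara p) = d :: t' →
          (pvIsTablePara d == pvIsTablePara p) = false := by
        intro d t' hdt
        have hne : t.dropWhile (fun x => pvIsTablePara x == pvIsTablePara p) ≠ [] := by
          rw [hdt]; simp
        have hh := List.head_dropWhile_not (fun x => pvIsTablePara x == pvIsTablePara p) hne
        rwa [show (t.dropWhile (fun x => pvIsTablePara x == pvIsTablePara p)).head hne = d by
          simp [hdt]] at hh
      have h3 : pvBody (t.dropWhile (fun x => pvIsTablePara x == pvIsTablePara p))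
          = pvR (t.dropWhile (fun x => pvIsTablePara x == pvIsTablePara p)) := by
        apply ih
        have := List.length_dropWhile_le (fun x => pvIsTablePara x == pvIsTablePara p) t
        simp at hl; omega
      have hstep := body_step p _ _ h1 h2 h3
      rwa [hsplit] at hstep

-- ===== VERDICT (by name: the statement is the Claim_ definition above) =====
theorem merge_table_paragraphs_py_spec : Claim_equal_merge_table_paragraphs_py := by
  intro paragraphs _
  unfold Spec_merge_table_paragraphs_py
  rw [A_eq_pvR, B_eq_body, body_eq_pvR paragraphs.length paragraphs le_rfl]
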